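-- pv_equiv track=rewrite | github.com/simesway/cyclist-riding-styles | src/maneuvers/utils.py | merge_crossings
-- ===== SOURCE A (Python) =====
-- def merge_crossings(crossings, delta=12):
--     """Merge nearby crossings into one group."""
--     if len(crossings) == 0:
--         return []
--     groups = [[crossings[0]]]
--     for c in crossings[1:]:
--         if c - groups[-1][-1] <= delta:
--             groups[-1].append(c)
--         else:
--             groups.append([c])
--     return groups
-- ===== SOURCE B (Python) =====
-- def merge_crossings(crossings, delta=12):
--     """Merge nearby crossings into one group."""
--     if len(crossings) == 0:
--         return []
--     n = len(crossings)
--     bounds = [i for i, (x, y) in enumerate(zip(crossings, crossings[1:]), 1) if y - x > delta]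
--     edges = [0] + bounds + [n]
--     return [crossings[a:b] for a, b in zip(edges, edges[1:])]
-- ===== Notes on version B (the rewrite author's own statement) =====
-- stated objective: alternative
-- what changed: A builds the groups in one accumulating loop that appends each element to the last group in place; B first computes the boundary indices (gaps > delta between consecutive elements) and then slices the input into contiguous sublists between successive edges.
import Mathlib
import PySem

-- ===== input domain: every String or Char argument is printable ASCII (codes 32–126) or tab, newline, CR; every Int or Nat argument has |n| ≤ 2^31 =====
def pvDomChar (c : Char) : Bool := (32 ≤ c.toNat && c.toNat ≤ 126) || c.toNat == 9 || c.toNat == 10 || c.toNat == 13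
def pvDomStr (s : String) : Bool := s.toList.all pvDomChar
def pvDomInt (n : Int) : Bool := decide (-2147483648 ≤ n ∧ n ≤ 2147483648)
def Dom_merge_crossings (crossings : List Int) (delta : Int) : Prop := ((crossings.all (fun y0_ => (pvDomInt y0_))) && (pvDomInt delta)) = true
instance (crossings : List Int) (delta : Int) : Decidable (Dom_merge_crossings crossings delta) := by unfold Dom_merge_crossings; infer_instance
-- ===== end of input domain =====

-- B groups by slicing between precomputed boundary indices instead of A's accumulating
-- loop; same O(n) cost, alternative decomposition. Return values only (A mutates no argument).

-- ===== PORT A =====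
-- the loop body: groups[-1][-1] is groups.getLastD [] … .getLastD 0 (defaults never read:
-- groups and its groups start nonempty and stay nonempty)
def mcStep (delta : Int) (groups : List (List Int)) (c : Int) : List (List Int) :=
  if c - ((groups.getLastD []).getLastD 0) ≤ delta then
    groups.dropLast ++ [(groups.getLastD []) ++ [c]]
  else
    groups ++ [[c]]

def merge_crossings (crossings : List Int) (delta : Int) : List (List Int) :=
  if crossings.length = 0 then []
  else
    (PySem.List.slice crossings (some 1) none).foldl (mcStep delta)
      [[PySem.List.pyGetD crossings 0 0]]   -- crossings[0]; guarded nonempty so the default is never read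

-- ===== PORT B =====
-- bounds = [i for i, (x, y) in enumerate(zip(crossings, crossings[1:]), 1) if y - x > delta]
def mcBounds (crossings : List Int) (delta : Int) : List Int :=
  ((PySem.List.enumerate (crossings.zip (PySem.List.slice crossings (some 1) none)) 1).filter
    (fun p => decide (p.2.2 - p.2.1 > delta))).map (fun p => p.1)

-- [crossings[a:b] for a, b in zip(edges, edges[1:])]
def mcRows (crossings : List Int) (edges : List Int) : List (List Int) :=
  (edges.zip (PySem.List.slice edges (some 1) none)).map
    (fun ab => PySem.List.slice crossings (some ab.1) (some ab.2))

def merge_crossings_alt (crossings : List Int) (delta : Int) : List (List Int) :=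
  if crossings.length = 0 then []
  else
    let n : Int := crossings.length
    let edges := [0] ++ mcBounds crossings delta ++ [n]
    mcRows crossings edges

-- ===== PRECONDITION & SPEC =====
def Spec_merge_crossings (crossings : List Int) (delta : Int) (out : List (List Int)) : Prop := out = merge_crossings_alt crossings delta
instance (crossings : List Int) (delta : Int) (out : List (List Int)) : Decidable (Spec_merge_crossings crossings delta out) := by unfold Spec_merge_crossings; infer_instance

-- ===== CLAIM (what is proved, stated in full; the proofs are below) =====
def Claim_equal_merge_crossings : Prop := ∀ (crossings : List Int) (delta : Int), Dom_merge_crossings crossings delta → Spec_merge_crossings crossings delta (merge_crossings crossings delta)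

-- ===== LEMMAS AND PROOFS =====

-- reference recursion: groups of c0 :: rest, built front-to-back
def mgo (delta c0 : Int) (rest : List Int) : List (List Int) :=
  match rest with
  | [] => [[c0]]
  | c :: rest' =>
    if c - c0 ≤ delta then
      match mgo delta c rest' with
      | [] => []
      | g :: gs => (c0 :: g) :: gs
    else
      [c0] :: mgo delta c rest'

theorem mgo_ne_nil (delta c0 : Int) (rest : List Int) : mgo delta c0 rest ≠ [] := by
  induction rest generalizing c0 with
  | nil => simp [mgo]
  | cons c rest' ih =>
    simp only [mgo]
    split
    · cases h : mgo delta c rest' with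
      | nil => exact absurd h (ih c)
      | cons g gs => simp
    · simp

-- ---- A-side ----
theorem mcStep_ne_nil (delta : Int) (gs : List (List Int)) (c : Int) : mcStep delta gs c ≠ [] := by
  unfold mcStep; split <;> simp

theorem mcStep_append (delta : Int) (P gs : List (List Int)) (c : Int) (h : gs ≠ []) :
    mcStep delta (P ++ gs) c = P ++ mcStep delta gs c := by
  rcases List.eq_nil_or_concat gs with rfl | ⟨init, g, rfl⟩
  · exact absurd rfl h
  · unfold mcStep
    simp only [List.concat_eq_append]
    rw [← List.append_assoc]
    rw [List.getLastD_concat, List.getLastD_concat, List.dropLast_concat, List.dropLast_concat]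
    split <;> simp

theorem foldA_prefix (delta : Int) (rest : List Int) :
    ∀ (P gs : List (List Int)), gs ≠ [] →
      rest.foldl (mcStep delta) (P ++ gs) = P ++ rest.foldl (mcStep delta) gs := by
  induction rest with
  | nil => intro P gs _; simp
  | cons c rest' ih =>
    intro P gs hgs
    simp only [List.foldl_cons]
    rw [mcStep_append delta P gs c hgs, ih P _ (mcStep_ne_nil delta gs c)]

theorem foldA (delta : Int) (rest : List Int) :
    ∀ (g : List Int) (c0 : Int),
      rest.foldl (mcStep delta) [g ++ [c0]] =
        match mgo delta c0 rest with
        | [] => []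
        | h :: t => (g ++ h) :: t := by
  induction rest with
  | nil => intro g c0; simp [mgo]
  | cons c rest' ih =>
    intro g c0
    simp only [List.foldl_cons, mgo]
    have hstep : mcStep delta [g ++ [c0]] c =
        if c - c0 ≤ delta then [(g ++ [c0]) ++ [c]] else [g ++ [c0]] ++ [[c]] := by
      unfold mcStep
      simp
    rw [hstep]
    by_cases hc : c - c0 ≤ delta
    · simp only [if_pos hc]
      rw [ih (g ++ [c0]) c]
      cases hm : mgo delta c rest' with
      | nil => exact absurd hm (mgo_ne_nil delta c rest')
      | cons h t => simp
    · simp only [if_neg hc]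
      rw [foldA_prefix delta rest' [g ++ [c0]] [[c]] (by simp)]
      have h2 := ih [] c
      simp only [List.nil_append] at h2
      rw [h2]
      cases hm : mgo delta c rest' with
      | nil => exact absurd hm (mgo_ne_nil delta c rest')
      | cons h t => simp

theorem A_eq_mgo (delta c0 : Int) (rest : List Int) :
    merge_crossings (c0 :: rest) delta = mgo delta c0 rest := by
  unfold merge_crossings
  rw [if_neg (by simp)]
  rw [PySem.List.slice_from_one]
  have hget : PySem.List.pyGetD (c0 :: rest) 0 0 = c0 := by
    simp [pysem]
  rw [hget]
  have h := foldA delta rest [] c0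
  simp only [List.nil_append] at h
  simp only [List.tail_cons]
  rw [h]
  cases hm : mgo delta c0 rest with
  | nil => exact absurd hm (mgo_ne_nil delta c0 rest)
  | cons h t => simp

-- ---- B-side ----
theorem mcBounds_pos (crossings : List Int) (delta : Int) :
    ∀ x ∈ mcBounds crossings delta, 1 ≤ x := by
  intro x hx
  unfold mcBounds at hx
  simp only [List.mem_map, List.mem_filter] at hx
  obtain ⟨p, ⟨hp, _⟩, rfl⟩ := hx
  rw [PySem.List.mem_enumerate_iff] at hp
  obtain ⟨k, hk, rfl⟩ := hp
  simp

theorem enumerate_succ {α : Type} (xs : List α) (s : Int) :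
    PySem.List.enumerate xs (s + 1) = (PySem.List.enumerate xs s).map (fun p => (p.1 + 1, p.2)) := by
  induction xs generalizing s with
  | nil => simp [pysem]
  | cons x xs ih =>
    rw [PySem.List.enumerate_cons, PySem.List.enumerate_cons, List.map_cons, ← ih]

theorem mcBounds_cons (delta c0 c1 : Int) (rest : List Int) :
    mcBounds (c0 :: c1 :: rest) delta =
      (if c1 - c0 > delta then [1] else []) ++ (mcBounds (c1 :: rest) delta).map (· + 1) := by
  unfold mcBounds
  rw [PySem.List.slice_from_one, PySem.List.slice_from_one]
  simp only [List.tail_cons, List.zip_cons_cons, PySem.List.enumerate_cons, enumerate_succ,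
    List.filter_cons, List.filter_map, List.map_map]
  by_cases h : c1 - c0 > delta
  · simp [h, Function.comp_def]
  · simp [h, Function.comp_def]

theorem slice_cons_shift (x : Int) (l : List Int) (a b : Int) (ha : 0 ≤ a) (hb : 0 ≤ b) :
    PySem.List.slice (x :: l) (some (a + 1)) (some (b + 1)) = PySem.List.slice l (some a) (some b) := by
  rw [PySem.List.slice_toNat (x :: l) (by omega) (by omega), PySem.List.slice_toNat l ha hb]
  have h1 : (a + 1).toNat = a.toNat + 1 := by omega
  have h2 : (b + 1).toNat - (a + 1).toNat = b.toNat - a.toNat := by omega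
  rw [h2, h1, List.drop_succ_cons]

theorem mcRows_shift (c0 : Int) (l : List Int) (edges : List Int)
    (h : ∀ x ∈ edges, 0 ≤ x) :
    mcRows (c0 :: l) (edges.map (· + 1)) = mcRows l edges := by
  unfold mcRows
  rw [PySem.List.slice_from_one, PySem.List.slice_from_one, ← List.map_tail, List.zip_map,
    List.map_map]
  apply List.map_congr_left
  intro ab hab
  obtain ⟨h1, h2⟩ := List.of_mem_zip hab
  have hb2 : ab.2 ∈ edges := List.mem_of_mem_tail h2
  simp only [Function.comp, Prod.map]
  exact slice_cons_shift c0 l ab.1 ab.2 (h ab.1 h1) (h ab.2 hb2)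

theorem alt_eq_rows (delta c0 : Int) (rest : List Int) :
    merge_crossings_alt (c0 :: rest) delta =
      mcRows (c0 :: rest) (0 :: (mcBounds (c0 :: rest) delta ++ [((c0 :: rest).length : Int)])) := by
  unfold merge_crossings_alt
  rw [if_neg (by simp)]
  rfl

theorem B_eq_mgo (delta : Int) : ∀ (rest : List Int) (c0 : Int),
    merge_crossings_alt (c0 :: rest) delta = mgo delta c0 rest := by
  intro rest
  induction rest with
  | nil =>
    intro c0
    rw [alt_eq_rows]
    have hb : mcBounds [c0] delta = [] := rfl
    rw [hb]
    show mcRows [c0] [0, 1] = [[c0]]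
    unfold mcRows
    rw [PySem.List.slice_from_one]
    show [PySem.List.slice [c0] (some 0) (some 1)] = [[c0]]
    rw [PySem.List.slice_zero_start, PySem.List.slice_to [c0] (by omega)]
    rfl
  | cons c1 rest' ih =>
    intro c0
    rw [alt_eq_rows, mcBounds_cons]
    have hlen : (((c0 :: c1 :: rest').length : Nat) : Int) = ((c1 :: rest').length : Int) + 1 := by
      simp
    have hEpos : ∀ x ∈ mcBounds (c1 :: rest') delta ++ [((c1 :: rest').length : Int)], 0 ≤ x := by
      intro x hx
      rcases List.mem_append.mp hx with h | h
      · exact le_trans (by omega) (mcBounds_pos _ delta x h)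
      · simp at h; omega
    have hmap1 : (mcBounds (c1 :: rest') delta).map (· + 1) ++ [(((c0 :: c1 :: rest').length : Nat) : Int)]
        = (mcBounds (c1 :: rest') delta ++ [((c1 :: rest').length : Int)]).map (· + 1) := by
      rw [hlen]; simp
    by_cases hc : c1 - c0 ≤ delta
    · -- no boundary after c0: first group of the tail result absorbs c0
      rw [if_neg (by omega)]
      cases hE : mcBounds (c1 :: rest') delta ++ [((c1 :: rest').length : Int)] with
      | nil => simp at hE
      | cons e E'' =>
        have he0 : 0 ≤ e := by apply hEpos; rw [hE]; simp
        rw [show (0 : Int) :: ([] ++ (mcBounds (c1 :: rest') delta).map (· + 1) ++ [(((c0 :: c1 :: rest').length : Nat) : Int)])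
            = 0 :: (e + 1) :: E''.map (· + 1) from by rw [List.nil_append, hmap1, hE]; simp]
        have hrow : mcRows (c0 :: c1 :: rest') (0 :: (e + 1) :: E''.map (· + 1))
            = PySem.List.slice (c0 :: c1 :: rest') (some 0) (some (e + 1))
              :: mcRows (c0 :: c1 :: rest') ((e + 1) :: E''.map (· + 1)) := by
          unfold mcRows
          rw [PySem.List.slice_from_one, PySem.List.slice_from_one]
          rfl
        rw [hrow,
          show ((e + 1) :: E''.map (· + 1)) = ((e :: E'').map (· + 1)) from rfl,
          mcRows_shift c0 (c1 :: rest') (e :: E'') (by intro x hx; apply hEpos; rw [hE]; exact hx)]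
        have hih : mgo delta c1 rest' = mcRows (c1 :: rest') (0 :: e :: E'') := by
          rw [← ih c1, alt_eq_rows, hE]
        simp only [mgo, if_pos hc]
        rw [hih]
        have hrow' : mcRows (c1 :: rest') (0 :: e :: E'')
            = PySem.List.slice (c1 :: rest') (some 0) (some e)
              :: mcRows (c1 :: rest') (e :: E'') := by
          unfold mcRows
          rw [PySem.List.slice_from_one, PySem.List.slice_from_one]
          rfl
        rw [hrow']
        show PySem.List.slice (c0 :: c1 :: rest') (some 0) (some (e + 1)) :: mcRows (c1 :: rest') (e :: E'')
            = (c0 :: PySem.List.slice (c1 :: rest') (some 0) (some e)) :: mcRows (c1 :: rest') (e :: E'')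
        rw [PySem.List.slice_zero_start, PySem.List.slice_zero_start,
          PySem.List.slice_to _ (by omega : (0 : Int) ≤ e + 1), PySem.List.slice_to _ he0]
        rw [show (e + 1).toNat = e.toNat + 1 from by omega, List.take_succ_cons]
    · -- a boundary right after c0: [c0] is its own group
      rw [if_pos (by omega)]
      rw [show (0 : Int) :: ([1] ++ (mcBounds (c1 :: rest') delta).map (· + 1) ++ [(((c0 :: c1 :: rest').length : Nat) : Int)])
          = 0 :: 1 :: (mcBounds (c1 :: rest') delta ++ [((c1 :: rest').length : Int)]).map (· + 1) from by
        rw [List.append_assoc, hmap1]; rfl]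
      have hrow : mcRows (c0 :: c1 :: rest') (0 :: 1 :: (mcBounds (c1 :: rest') delta ++ [((c1 :: rest').length : Int)]).map (· + 1))
          = PySem.List.slice (c0 :: c1 :: rest') (some 0) (some 1)
            :: mcRows (c0 :: c1 :: rest') (1 :: (mcBounds (c1 :: rest') delta ++ [((c1 :: rest').length : Int)]).map (· + 1)) := by
        unfold mcRows
        rw [PySem.List.slice_from_one, PySem.List.slice_from_one]
        rfl
      rw [hrow,
        show (1 : Int) :: (mcBounds (c1 :: rest') delta ++ [((c1 :: rest').length : Int)]).map (· + 1)
          = ((0 :: (mcBounds (c1 :: rest') delta ++ [((c1 :: rest').length : Int)])).map (· + 1)) from by simp,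
        mcRows_shift c0 (c1 :: rest') _ (by
          intro x hx
          rcases List.mem_cons.mp hx with rfl | h
          · omega
          · exact hEpos x h)]
      have hih : mgo delta c1 rest' = mcRows (c1 :: rest') (0 :: (mcBounds (c1 :: rest') delta ++ [((c1 :: rest').length : Int)])) := by
        rw [← ih c1, alt_eq_rows]
      simp only [mgo, if_neg hc]
      rw [hih]
      congr 1

-- ===== VERDICT (by name: the statement is the Claim_ definition above) =====
theorem merge_crossings_spec : Claim_equal_merge_crossings := by
  intro crossings delta _
  unfold Spec_merge_crossings
  cases crossings with
  | nil => rfl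
  | cons c0 rest => rw [A_eq_mgo, B_eq_mgo]
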